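-- pv_equiv track=rewrite | github.com/ericdunham/farmers-market | .tox/py36/lib/python3.6/site-packages/market/market.py | apom_verbose
-- ===== SOURCE A (Python) =====
-- def apom_verbose(basket):
--     """Applies the APOM discount to the `basket`, if applicable.
--
--     .. deprecated:: 0.0.1
--         Use :func:`apom` instead.
--
--     :param list(str) basket: The basket to apply the APOM discount to.
--     :returns: The `basket` with the applicable discount applied.
--     :rtype: list(str)
--     """
--     if basket.count('OM1') < 1:
--         return basket
--     half_off_apples = min(basket.count('OM1'), basket.count('AP1'))
--     discounted_basket = []
--     for item in basket:
--         discounted_basket.append(item)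
--         if item == 'AP1' and half_off_apples > 0:
--             discounted_basket.append('APOM')
--             half_off_apples -= 1
--     return discounted_basket
-- ===== SOURCE B (Python) =====
-- def apom_verbose(basket):
--     if basket.count('OM1') < 1:
--         return basket
--     k = min(basket.count('OM1'), basket.count('AP1'))
--     indices = [i for i, x in enumerate(basket) if x == 'AP1']
--     result = list(basket)
--     for i in reversed(indices[:k]):
--         result.insert(i + 1, 'APOM')
--     return result
-- ===== Notes on version B (the rewrite author's own statement) =====
-- stated objective: alternative
-- what changed: B builds an explicit index of apple positions and inserts 'APOM' into a copy of the basket at those positions in reverse order, instead of A's single streaming pass that appends items while decrementing a running discount budget.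
import Mathlib
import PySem

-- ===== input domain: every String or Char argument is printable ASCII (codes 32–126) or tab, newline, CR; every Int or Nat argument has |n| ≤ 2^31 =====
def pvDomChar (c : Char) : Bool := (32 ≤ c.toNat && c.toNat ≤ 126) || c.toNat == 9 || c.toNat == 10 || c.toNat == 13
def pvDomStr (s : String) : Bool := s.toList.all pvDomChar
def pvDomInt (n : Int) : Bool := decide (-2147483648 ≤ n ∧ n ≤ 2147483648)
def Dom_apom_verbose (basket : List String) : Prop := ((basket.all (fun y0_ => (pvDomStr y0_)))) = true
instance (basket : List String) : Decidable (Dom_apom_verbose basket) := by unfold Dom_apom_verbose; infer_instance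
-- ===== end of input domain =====

-- B replaces A's streaming append-with-budget pass by an explicit index of apple positions
-- and reverse-order insertions into a copy of the basket (alternative decomposition, same cost class).

-- ===== PORT A =====
def apom_verbose (basket : List String) : List String :=
  if PySem.List.count basket "OM1" < 1 then basket
  else
    let half : Int := min (PySem.List.count basket "OM1" : Int) (PySem.List.count basket "AP1" : Int)
    (basket.foldl (fun (st : List String × Int) item =>
        let acc := st.1 ++ [item]
        if item = "AP1" ∧ 0 < st.2 then (acc ++ ["APOM"], st.2 - 1)
        else (acc, st.2)) ([], half)).1

-- ===== PORT B =====
def apom_verbose_alt (basket : List String) : List String :=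
  if PySem.List.count basket "OM1" < 1 then basket
  else
    let k := min (PySem.List.count basket "OM1") (PySem.List.count basket "AP1")
    let indices := ((PySem.List.enumerate basket).filter (fun p => p.2 == "AP1")).map (fun p => p.1)
    ((indices.take k).reverse).foldl (fun r i => PySem.List.insert r (i + 1) "APOM") basket

-- ===== PRECONDITION & SPEC =====
def Spec_apom_verbose (basket : List String) (out : List String) : Prop := out = apom_verbose_alt basket
instance (basket : List String) (out : List String) : Decidable (Spec_apom_verbose basket out) := by unfold Spec_apom_verbose; infer_instance

-- ===== CLAIM (what is proved, stated in full; the proofs are below) =====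
def Claim_equal_apom_verbose : Prop := ∀ (basket : List String), Dom_apom_verbose basket → Spec_apom_verbose basket (apom_verbose basket)

-- ===== LEMMAS AND PROOFS =====

-- Common specification: insert "APOM" after each of the first k apples.
def pvSpecF (xs : List String) (k : Int) : List String :=
  match xs with
  | [] => []
  | x :: rest => if x = "AP1" ∧ 0 < k then x :: "APOM" :: pvSpecF rest (k - 1) else x :: pvSpecF rest k

theorem pvSpecF_zero (xs : List String) : pvSpecF xs 0 = xs := by
  induction xs with
  | nil => rfl
  | cons x rest ih => simp [pvSpecF, ih]

-- A's fold computes acc ++ pvSpecF.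
theorem pvFoldA (xs : List String) (acc : List String) (h : Int) :
    (xs.foldl (fun (st : List String × Int) item =>
        let a := st.1 ++ [item]
        if item = "AP1" ∧ 0 < st.2 then (a ++ ["APOM"], st.2 - 1)
        else (a, st.2)) (acc, h)).1 = acc ++ pvSpecF xs h := by
  induction xs generalizing acc h with
  | nil => simp [pvSpecF]
  | cons x rest ih =>
      by_cases hx : x = "AP1" ∧ 0 < h
      · simp only [List.foldl_cons, pvSpecF, hx]
        simpa [hx.1] using ih (acc ++ [x, "APOM"]) (h - 1)
      · simp only [List.foldl_cons, pvSpecF, if_neg hx]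
        simpa using ih (acc ++ [x]) h

-- insert at a nonnegative position is take/drop (Python clamps above the length).
theorem pvInsert_nonneg {α : Type} (xs : List α) (i : Int) (v : α) (hi : 0 ≤ i) :
    PySem.List.insert xs i v = xs.take i.toNat ++ v :: xs.drop i.toNat := by
  simp only [PySem.List.insert, PySem.List.sliceIndices]
  have h1 : ¬ ((1:Int) < 0) := by omega
  have h2 : ¬ (i < 0) := by omega
  simp only [h1, if_false, h2]
  by_cases hle : i ≤ (xs.length : Int)
  · have : (min i (xs.length:Int)).toNat = i.toNat := by omega
    simp [this]
  · have hm : (min i (xs.length:Int)).toNat = xs.length := by omega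
    have hge : xs.length ≤ i.toNat := by omega
    rw [hm, List.take_of_length_le hge, List.take_of_length_le le_rfl,
      List.drop_of_length_le hge, List.drop_of_length_le le_rfl]

theorem pvInsert_cons {α : Type} (x : α) (xs : List α) (i : Int) (v : α) (hi : 0 ≤ i) :
    PySem.List.insert (x :: xs) (i + 1) v = x :: PySem.List.insert xs i v := by
  rw [pvInsert_nonneg _ _ _ (by omega), pvInsert_nonneg _ _ _ hi]
  have : (i + 1).toNat = i.toNat + 1 := by omega
  simp [this]

-- inserting at shifted positions commutes with cons.
theorem pvFoldIns_cons (L : List Int) (x : String) (xs : List String)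
    (hL : ∀ i ∈ L, 0 ≤ i) :
    (L.map (· + 1)).foldl (fun r i => PySem.List.insert r (i + 1) "APOM") (x :: xs)
      = x :: L.foldl (fun r i => PySem.List.insert r (i + 1) "APOM") xs := by
  induction L generalizing xs with
  | nil => rfl
  | cons j rest ih =>
      have hj : (0:Int) ≤ j + 1 := by have := hL j (by simp); omega
      simp only [List.map_cons, List.foldl_cons]
      rw [show (j + 1 + 1 : Int) = (j + 1) + 1 by ring, pvInsert_cons _ _ _ _ hj]
      exact ih _ (fun i hi => hL i (by simp [hi]))

def pvIdx (xs : List String) : List Int :=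
  ((PySem.List.enumerate xs).filter (fun p => p.2 == "AP1")).map (fun p => p.1)

theorem pvEnum_shift (xs : List String) (s : Int) :
    PySem.List.enumerate xs (s + 1) = (PySem.List.enumerate xs s).map (fun p => (p.1 + 1, p.2)) := by
  induction xs generalizing s with
  | nil => simp [PySem.List.enumerate_nil]
  | cons x rest ih => simp [PySem.List.enumerate_cons, ih (s+1)]

theorem pvIdx_cons (x : String) (xs : List String) :
    pvIdx (x :: xs) = (if x = "AP1" then [(0:Int)] else []) ++ (pvIdx xs).map (· + 1) := by
  unfold pvIdx
  rw [PySem.List.enumerate_cons, show (0:Int) + 1 = 0 + 1 by rfl, pvEnum_shift]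
  by_cases hx : x = "AP1" <;>
    simp [hx, List.filter_map, List.map_map, Function.comp_def]

theorem pvIdx_nonneg (xs : List String) : ∀ i ∈ pvIdx xs, 0 ≤ i := by
  induction xs with
  | nil => simp [pvIdx, PySem.List.enumerate_nil]
  | cons x rest ih =>
      intro i hi
      rw [pvIdx_cons] at hi
      rcases List.mem_append.1 hi with h | h
      · split at h <;> simp_all
      · obtain ⟨j, hj, rfl⟩ := List.mem_map.1 h
        have := ih j hj; omega

theorem pvFoldB (xs : List String) (k : Nat) :
    (((pvIdx xs).take k).reverse).foldl (fun r i => PySem.List.insert r (i + 1) "APOM") xs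
      = pvSpecF xs (k : Int) := by
  induction xs generalizing k with
  | nil => simp [pvIdx, PySem.List.enumerate_nil, pvSpecF]
  | cons x rest ih =>
      rw [pvIdx_cons]
      by_cases hx : x = "AP1"
      · cases k with
        | zero => simp [pvSpecF, hx, pvSpecF_zero]
        | succ k =>
            have hnn : ∀ i ∈ ((pvIdx rest).take k).reverse, 0 ≤ i := by
              intro i hi
              exact pvIdx_nonneg rest i (List.mem_of_mem_take (List.mem_reverse.1 hi))
            simp only [hx, if_true, List.singleton_append, List.take_succ_cons,
              List.reverse_cons, ← List.map_take, ← List.map_reverse, List.foldl_append,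
              List.foldl_cons, List.foldl_nil]
            rw [pvFoldIns_cons _ _ _ hnn, ih k]
            rw [show (0:Int) + 1 = 0 + 1 by rfl, pvInsert_cons _ _ _ _ le_rfl,
              pvInsert_nonneg _ _ _ le_rfl]
            simp [pvSpecF]
      · have hnn : ∀ i ∈ ((pvIdx rest).take k).reverse, 0 ≤ i := by
          intro i hi
          exact pvIdx_nonneg rest i (List.mem_of_mem_take (List.mem_reverse.1 hi))
        simp only [hx, if_false, List.nil_append, ← List.map_take, ← List.map_reverse]
        rw [pvFoldIns_cons _ _ _ hnn, ih k]
        simp [pvSpecF, hx]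

-- ===== VERDICT (by name: the statement is the Claim_ definition above) =====
theorem apom_verbose_spec : Claim_equal_apom_verbose := by
  intro basket _
  unfold Spec_apom_verbose apom_verbose apom_verbose_alt
  by_cases h : PySem.List.count basket "OM1" < 1
  · rw [if_pos h, if_pos h]
  · rw [if_neg h, if_neg h]
    rw [pvFoldA basket [] _, List.nil_append]
    rw [show ((PySem.List.enumerate basket).filter (fun p => p.2 == "AP1")).map (fun p => p.1) = pvIdx basket from rfl]
    rw [pvFoldB basket _]
    congr 1
    omega
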